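-- pv_equiv track=rewrite | github.com/ryumacodes/tunacode | src/tunacode/skills/loader.py | _derive_legacy_description
-- ===== SOURCE A (Python) =====
-- MARKDOWN_HEADING_PREFIX = "#"
--
-- MARKDOWN_FENCE_PREFIX = "```"
--
-- LEGACY_DESCRIPTION_FALLBACK = "Legacy skill"
--
-- def _derive_legacy_description(content: str) -> str:
--     first_heading: str | None = None
--     in_code_fence = False
--
--     for raw_line in content.splitlines():
--         stripped_line = raw_line.strip()
--         if not stripped_line:
--             continue
--
--         if stripped_line.startswith(MARKDOWN_FENCE_PREFIX):
--             in_code_fence = not in_code_fence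
--             continue
--
--         if in_code_fence:
--             continue
--
--         if stripped_line.startswith(MARKDOWN_HEADING_PREFIX):
--             if first_heading is None:
--                 first_heading = stripped_line.lstrip(MARKDOWN_HEADING_PREFIX).strip()
--             continue
--
--         return stripped_line
--
--     if first_heading is not None:
--         return first_heading
--
--     return LEGACY_DESCRIPTION_FALLBACK
-- ===== SOURCE B (Python) =====
-- MARKDOWN_HEADING_PREFIX = "#"
-- MARKDOWN_FENCE_PREFIX = "```"
-- LEGACY_DESCRIPTION_FALLBACK = "Legacy skill"
--
--
-- def _derive_legacy_description(content: str) -> str: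
--     # Pass 1: strip the markdown noise -> list of visible stripped lines.
--     visible = []
--     in_code_fence = False
--     for raw_line in content.splitlines():
--         stripped = raw_line.strip()
--         if not stripped:
--             continue
--         if stripped.startswith(MARKDOWN_FENCE_PREFIX):
--             in_code_fence = not in_code_fence
--             continue
--         if not in_code_fence:
--             visible.append(stripped)
--     # Pass 2: pick the description.
--     body = next((l for l in visible if not l.startswith(MARKDOWN_HEADING_PREFIX)), None)
--     if body is not None:
--         return body
--     if visible:
--         return visible[0].lstrip(MARKDOWN_HEADING_PREFIX).strip()
--     return LEGACY_DESCRIPTION_FALLBACK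
-- ===== Notes on version B (the rewrite author's own statement) =====
-- stated objective: simpler
-- what changed: B separates the work into two passes: first collect all visible stripped lines (skipping blanks, fence markers and fenced content), then pick the first non-heading line, falling back to the first heading (lstripped of '#') or the constant; A interleaves heading tracking and early return inside one stateful loop.
import Mathlib
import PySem

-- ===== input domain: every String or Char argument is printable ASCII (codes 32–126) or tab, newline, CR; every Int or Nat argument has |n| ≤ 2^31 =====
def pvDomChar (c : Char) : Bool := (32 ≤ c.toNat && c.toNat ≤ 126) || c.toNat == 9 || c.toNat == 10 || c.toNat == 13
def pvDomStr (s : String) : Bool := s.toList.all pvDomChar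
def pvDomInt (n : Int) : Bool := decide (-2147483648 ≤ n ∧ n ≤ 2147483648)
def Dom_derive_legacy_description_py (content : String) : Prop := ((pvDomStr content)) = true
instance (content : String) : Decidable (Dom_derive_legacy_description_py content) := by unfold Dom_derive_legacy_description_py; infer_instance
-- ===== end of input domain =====

-- B restructures A's single stateful early-return loop into two passes: collect visible lines, then pick; objective: simpler decomposition.

-- s.lstrip('#'): hand port, exact — lstrip with a one-character set drops exactly the leading '#'s
def lstripHash (s : String) : String := String.ofList (s.toList.dropWhile (· == '#'))

-- ===== PORT A =====
def aLoop : List String → Option String → Bool → String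
  | [], fh, _ => match fh with | some h => h | none => "Legacy skill"
  | l :: ls, fh, fence =>
      let s := PySem.Str.strip l
      if s = "" then aLoop ls fh fence
      else if PySem.Str.startswith s "```" then aLoop ls fh (!fence)
      else if fence then aLoop ls fh fence
      else if PySem.Str.startswith s "#" then
        aLoop ls (match fh with | none => some (PySem.Str.strip (lstripHash s)) | some h => some h) fence
      else s

def derive_legacy_description_py (content : String) : String :=
  aLoop (PySem.Str.splitlines content) none false

-- ===== PORT B =====
-- pass 1: the visible stripped lines (blanks, fence markers and fenced content skipped)
def collectVisible : List String → Bool → List String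
  | [], _ => []
  | l :: ls, fence =>
      let s := PySem.Str.strip l
      if s = "" then collectVisible ls fence
      else if PySem.Str.startswith s "```" then collectVisible ls (!fence)
      else if fence then collectVisible ls fence
      else s :: collectVisible ls fence

-- pass 2: first non-heading line, else first heading lstripped of '#', else the fallback
def pickDescription (visible : List String) : String :=
  match visible.find? (fun l => !(PySem.Str.startswith l "#")) with
  | some b => b
  | none =>
    match visible with
    | h :: _ => PySem.Str.strip (lstripHash h)
    | [] => "Legacy skill"

def derive_legacy_description_py_alt (content : String) : String :=
  pickDescription (collectVisible (PySem.Str.splitlines content) false)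

-- ===== PRECONDITION & SPEC =====
def Spec_derive_legacy_description_py (content : String) (out : String) : Prop := out = derive_legacy_description_py_alt content
instance (content : String) (out : String) : Decidable (Spec_derive_legacy_description_py content out) := by unfold Spec_derive_legacy_description_py; infer_instance

-- ===== CLAIM (what is proved, stated in full; the proofs are below) =====
def Claim_equal_derive_legacy_description_py : Prop := ∀ (content : String), Dom_derive_legacy_description_py content → Spec_derive_legacy_description_py content (derive_legacy_description_py content)

-- ===== LEMMAS AND PROOFS =====

-- loop invariant: A's loop equals B's pick over the not-yet-collected visible lines,
-- with the pending first_heading fh deciding the all-headings outcome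
lemma aLoop_eq_pick (ls : List String) : ∀ (fh : Option String) (fence : Bool),
    aLoop ls fh fence =
      (match (collectVisible ls fence).find? (fun l => !(PySem.Str.startswith l "#")) with
       | some b => b
       | none =>
         match fh with
         | some h => h
         | none =>
           match collectVisible ls fence with
           | h :: _ => PySem.Str.strip (lstripHash h)
           | [] => "Legacy skill") := by
  induction ls with
  | nil => intro fh fence; cases fh <;> simp [aLoop, collectVisible]
  | cons l ls ih =>
    intro fh fence
    simp only [aLoop, collectVisible]
    split_ifs with h1 h2 h3 h4
    · exact ih fh fence
    · exact ih fh (!fence)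
    · exact ih fh fence
    · rw [ih]
      simp at h4
      cases fh <;> simp [List.find?, h4]
    · simp at h4
      simp [List.find?, h4]

-- ===== VERDICT (by name: the statement is the Claim_ definition above) =====
theorem derive_legacy_description_py_spec : Claim_equal_derive_legacy_description_py := by
  intro content _
  unfold Spec_derive_legacy_description_py derive_legacy_description_py derive_legacy_description_py_alt pickDescription
  rw [aLoop_eq_pick]
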